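-- pv_equiv track=rewrite | github.com/wilmurillo-ai/Design-Assistant | .skills/openclaw-skills/skills/juneyaooo/mediwise-health-suite/mediwise-health-tracker/scripts/doctor_visit_report.py | _humanize_tip_text
-- ===== SOURCE A (Python) =====
-- METRIC_LABELS = {
--     "blood_pressure": "血压",
--     "blood_sugar": "血糖",
--     "heart_rate": "心率",
--     "weight": "体重",
--     "temperature": "体温",
--     "blood_oxygen": "血氧",
-- }
--
-- def _humanize_tip_text(text: str | None) -> str:
--     if not text:
--         return ""
--     result = str(text)
--     for key, label in METRIC_LABELS.items():
--         result = result.replace(key, label)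
--     result = result.replace('systolic', '收缩压').replace('diastolic', '舒张压')
--     result = result.replace('fasting', '空腹').replace('postprandial', '餐后')
--     return result
-- ===== SOURCE B (Python) =====
-- import re
--
-- METRIC_LABELS = {
--     "blood_pressure": "血压",
--     "blood_sugar": "血糖",
--     "heart_rate": "心率",
--     "weight": "体重",
--     "temperature": "体温",
--     "blood_oxygen": "血氧",
-- }
--
-- _MAPPING = {
--     **METRIC_LABELS,
--     "systolic": "收缩压",
--     "diastolic": "舒张压",
--     "fasting": "空腹",
--     "postprandial": "餐后",
-- }
--
-- _PATTERN = re.compile("|".join(re.escape(k) for k in _MAPPING))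
--
--
-- def _humanize_tip_text(text):
--     if not text:
--         return ""
--     return _PATTERN.sub(lambda m: _MAPPING[m.group()], str(text))
-- ===== Notes on version B (the rewrite author's own statement) =====
-- stated objective: idiomatic
-- what changed: Replaces ten sequential whole-string .replace passes with one precompiled alternation regex and a lookup table, translating all metric keywords in a single left-to-right pass.
import Mathlib
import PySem

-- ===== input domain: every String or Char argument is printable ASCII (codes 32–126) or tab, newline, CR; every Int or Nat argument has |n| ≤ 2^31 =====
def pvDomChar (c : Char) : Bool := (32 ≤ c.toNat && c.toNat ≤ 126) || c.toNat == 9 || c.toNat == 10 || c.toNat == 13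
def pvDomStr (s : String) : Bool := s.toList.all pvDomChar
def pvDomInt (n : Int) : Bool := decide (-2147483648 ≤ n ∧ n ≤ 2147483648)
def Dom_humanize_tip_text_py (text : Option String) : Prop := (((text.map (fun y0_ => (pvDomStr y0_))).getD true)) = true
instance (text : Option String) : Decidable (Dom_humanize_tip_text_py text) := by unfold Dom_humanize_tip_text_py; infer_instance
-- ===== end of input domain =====

-- B replaces A's ten sequential whole-string .replace passes by one merged lookup table
-- applied in a single left-to-right scan (the meaning of Source B's alternation regex sub); objective: idiomatic.

-- ===== PORT A =====
def pvMetricLabels : List (String × String) :=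
  [("blood_pressure", "血压"), ("blood_sugar", "血糖"), ("heart_rate", "心率"),
   ("weight", "体重"), ("temperature", "体温"), ("blood_oxygen", "血氧")]

def humanize_tip_text_py (text : Option String) : String :=
  match text with
  | none => ""                 -- `if not text` for text = None
  | some t =>
    if t = "" then ""          -- `if not text` for text = ""
    else
      -- for key, label in METRIC_LABELS.items(): result = result.replace(key, label)
      let r0 := pvMetricLabels.foldl (fun r kl => PySem.Str.replace r kl.1 kl.2) t
      let r1 := PySem.Str.replace (PySem.Str.replace r0 "systolic" "收缩压") "diastolic" "舒张压"
      PySem.Str.replace (PySem.Str.replace r1 "fasting" "空腹") "postprandial" "餐后"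

-- ===== PORT B =====
-- Source B merges METRIC_LABELS with the four extra pairs into one table and performs a single
-- left-to-right pass via re.sub over the alternation of the escaped literal keys; that regex
-- sub is ported exactly as this scanner: at each position the first table key that matches is
-- replaced by its label (regex alternation order; no key is a prefix of another), else the
-- character is copied.
def pvMapping : List (List Char × List Char) :=
  [("blood_pressure".toList, "血压".toList), ("blood_sugar".toList, "血糖".toList),
   ("heart_rate".toList, "心率".toList), ("weight".toList, "体重".toList),
   ("temperature".toList, "体温".toList), ("blood_oxygen".toList, "血氧".toList),
   ("systolic".toList, "收缩压".toList), ("diastolic".toList, "舒张压".toList),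
   ("fasting".toList, "空腹".toList), ("postprandial".toList, "餐后".toList)]

def pvFindKey (m : List (List Char × List Char)) (s : List Char) :
    Option (List Char × List Char) :=
  match m with
  | [] => none
  | kl :: rest => if kl.1.isPrefixOf s then some kl else pvFindKey rest s

-- needed by pvSub's termination proof
theorem pvFindKey_some {m : List (List Char × List Char)} {s : List Char}
    {kl : List Char × List Char} (h : pvFindKey m s = some kl) :
    kl ∈ m ∧ kl.1 <+: s := by
  induction m with
  | nil => simp [pvFindKey] at h
  | cons hd tl ih =>
    by_cases hp : hd.1.isPrefixOf s
    · simp [pvFindKey, hp] at h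
      subst h
      exact ⟨List.mem_cons_self, List.isPrefixOf_iff_prefix.mp hp⟩
    · simp [pvFindKey, hp] at h
      rcases ih h with ⟨h1, h2⟩
      exact ⟨List.mem_cons_of_mem _ h1, h2⟩

-- needed by pvSub's termination proof
theorem pvMapping_key_ne_nil {kl : List Char × List Char} (h : kl ∈ pvMapping) :
    kl.1 ≠ [] := by
  fin_cases h <;> decide

def pvSub (s : List Char) : List Char :=
  match s with
  | [] => []
  | c :: t =>
    match h : pvFindKey pvMapping (c :: t) with
    | some kl => kl.2 ++ pvSub ((c :: t).drop kl.1.length)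
    | none => c :: pvSub t
termination_by s.length
decreasing_by
  · rcases pvFindKey_some h with ⟨hm, _⟩
    have hne : kl.1 ≠ [] := pvMapping_key_ne_nil hm
    have hpos : 0 < kl.1.length := List.length_pos_iff.mpr hne
    simp only [List.length_drop, List.length_cons]
    omega
  · simp

def humanize_tip_text_py_alt (text : Option String) : String :=
  match text with
  | none => ""
  | some t =>
    if t = "" then ""
    else String.ofList (pvSub t.toList)

-- ===== PRECONDITION & SPEC =====
def Spec_humanize_tip_text_py (text : Option String) (out : String) : Prop := out = humanize_tip_text_py_alt text
instance (text : Option String) (out : String) : Decidable (Spec_humanize_tip_text_py text out) := by unfold Spec_humanize_tip_text_py; infer_instance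

-- ===== CLAIM (what is proved, stated in full; the proofs are below) =====
def Claim_equal_humanize_tip_text_py : Prop := ∀ (text : Option String), Dom_humanize_tip_text_py text → Spec_humanize_tip_text_py text (humanize_tip_text_py text)

-- ===== LEMMAS AND PROOFS =====

-- natural recursion computing PySem.Chars.replace for a nonempty pattern
def pvRep (old new : List Char) (s : List Char) : List Char :=
  match s with
  | [] => []
  | c :: t =>
    if h : old.isPrefixOf (c :: t) ∧ 0 < old.length then
      new ++ pvRep old new ((c :: t).drop old.length)
    else c :: pvRep old new t
termination_by s.length
decreasing_by
  · simp only [List.length_drop, List.length_cons]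
    omega
  · simp

theorem pvRep_nil (old new : List Char) : pvRep old new [] = [] := by
  rw [pvRep]

theorem pvRep_cons_pos {old : List Char} (new : List Char) {c : Char} {t : List Char}
    (h1 : old <+: (c :: t)) (h2 : old ≠ []) :
    pvRep old new (c :: t) = new ++ pvRep old new ((c :: t).drop old.length) := by
  rw [pvRep]
  simp [List.isPrefixOf_iff_prefix.mpr h1, List.length_pos_iff.mpr h2]

theorem pvRep_cons_neg {old : List Char} (new : List Char) {c : Char} {t : List Char}
    (h1 : ¬ old <+: (c :: t)) :
    pvRep old new (c :: t) = c :: pvRep old new t := by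
  rw [pvRep, dif_neg]
  exact fun hb => h1 (List.isPrefixOf_iff_prefix.mp hb.1)

theorem pvRep_go_eq (old new : List Char) (hold : old ≠ []) :
    ∀ fuel l acc, l.length ≤ fuel →
      PySem.Chars.replace.go old new fuel l acc = acc.reverse ++ pvRep old new l := by
  intro fuel
  induction fuel with
  | zero =>
    intro l acc hl
    have : l = [] := List.length_eq_zero_iff.mp (Nat.le_zero.mp hl)
    subst this
    rw [PySem.Chars.replace.go, pvRep_nil]
  | succ n ih =>
    intro l acc hl
    cases l with
    | nil =>
      rw [PySem.Chars.replace.go, pvRep_nil]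
      all_goals simp
    | cons c t =>
      rw [PySem.Chars.replace.go]
      by_cases hp : old.isPrefixOf (c :: t)
      · have hpre := List.isPrefixOf_iff_prefix.mp hp
        have hlen : old.length ≤ (c :: t).length := hpre.length_le
        have hop : 0 < old.length := List.length_pos_iff.mpr hold
        simp only [hp, if_true]
        rw [ih _ _ (by simp at hl ⊢; omega)]
        rw [pvRep_cons_pos new hpre hold]
        simp
      · simp only [hp, Bool.false_eq_true, if_false]
        rw [ih _ _ (by simp at hl ⊢; omega)]
        rw [pvRep_cons_neg new (fun hb => hp (List.isPrefixOf_iff_prefix.mpr hb))]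
        simp

theorem pvReplace_eq_pvRep (s old new : List Char) (hold : old ≠ []) :
    PySem.Chars.replace s old new = pvRep old new s := by
  rw [PySem.Chars.replace]
  simp only [List.isEmpty_iff, hold, if_false]
  simpa using pvRep_go_eq old new hold s.length s [] le_rfl

-- sequential passes, as port A performs them, over char-list pairs
def pvSeq (ps : List (List Char × List Char)) (s : List Char) : List Char :=
  ps.foldl (fun r kl => pvRep kl.1 kl.2 r) s

-- no occurrence of k can start strictly inside a (so a replace pass for k walks over a ++ r
-- without touching the block a, whatever r is)
def pvNoOvP (a k : List Char) : Prop :=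
  ∀ p, p < a.length → ¬ (a.drop p <+: k) ∧ ¬ (k <+: a.drop p)

theorem pvPrefix_append_cases {k a r : List Char} (h : k <+: a ++ r) : k <+: a ∨ a <+: k := by
  rcases Nat.le_total k.length a.length with hl | hl
  · exact Or.inl (List.prefix_of_prefix_length_le h (List.prefix_append a r) hl)
  · exact Or.inr (List.prefix_of_prefix_length_le (List.prefix_append a r) h hl)

theorem pvNoOvP_not_prefix {a k r : List Char} (h : pvNoOvP a k) (ha : a ≠ []) :
    ¬ k <+: a ++ r := by
  intro hk
  rcases pvPrefix_append_cases hk with h1 | h1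
  · exact ((h 0 (List.length_pos_iff.mpr ha)).2) (by simpa using h1)
  · exact ((h 0 (List.length_pos_iff.mpr ha)).1) (by simpa using h1)

-- a replace pass commutes past a block it cannot match into
theorem pvRep_append_of_noOv {a k : List Char} (l : List Char) (h : pvNoOvP a k) :
    ∀ r, pvRep k l (a ++ r) = a ++ pvRep k l r := by
  induction a with
  | nil => simp
  | cons c a' ih =>
    intro r
    have hnp : ¬ k <+: (c :: a') ++ r := pvNoOvP_not_prefix h (by simp)
    rw [List.cons_append, pvRep_cons_neg l (by simpa using hnp)]
    have h' : pvNoOvP a' k := by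
      intro p hp
      have := h (p + 1) (by simp; omega)
      simpa using this
    rw [ih h' r]
    simp

-- a replace pass with a label disjoint from k' creates no new occurrence of k'
theorem pvRep_no_new_prefix {k l : List Char} (hk : k ≠ []) (hl : l ≠ []) :
    ∀ u k', (∀ c ∈ k', c ∉ l) → k' <+: pvRep k l u → k' <+: u := by
  intro u
  induction u using pvRep.induct (old := k) with
  | case1 =>
    intro k' _ hpre
    rw [pvRep_nil] at hpre
    rw [List.prefix_nil.mp hpre]
  | case2 c t hcond ih =>
    intro k' hdisj hpre
    rw [pvRep_cons_pos l (List.isPrefixOf_iff_prefix.mp hcond.1) hk] at hpre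
    cases k' with
    | nil => exact List.nil_prefix
    | cons d k'' =>
      cases l with
      | nil => exact absurd rfl hl
      | cons e l' =>
        have hde : d = e := (List.cons_prefix_cons.mp hpre).1
        have : d ∉ e :: l' := hdisj d List.mem_cons_self
        exact absurd (hde ▸ List.mem_cons_self) this
  | case3 c t hcond ih =>
    intro k' hdisj hpre
    have hnp : ¬ k <+: (c :: t) := by
      intro hpp
      exact hcond ⟨List.isPrefixOf_iff_prefix.mpr hpp, List.length_pos_iff.mpr hk⟩
    rw [pvRep_cons_neg l hnp] at hpre
    cases k' with
    | nil => exact List.nil_prefix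
    | cons d k'' =>
      rcases List.cons_prefix_cons.mp hpre with ⟨hdc, htl⟩
      have : k'' <+: t := ih k'' (fun x hx => hdisj x (List.mem_cons_of_mem _ hx)) htl
      exact List.cons_prefix_cons.mpr ⟨hdc, this⟩

theorem pvSeq_cons (kl : List Char × List Char) (ps : List (List Char × List Char))
    (s : List Char) : pvSeq (kl :: ps) s = pvSeq ps (pvRep kl.1 kl.2 s) := rfl

theorem pvSeq_nil_str (ps : List (List Char × List Char)) : pvSeq ps [] = [] := by
  induction ps with
  | nil => rfl
  | cons hd tl ih => rw [pvSeq_cons, pvRep_nil, ih]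

theorem pvNoOvP_of_disjoint {a k : List Char} (hk : k ≠ []) (hd : ∀ d ∈ k, d ∉ a) :
    pvNoOvP a k := by
  intro p hp
  have hb : a.drop p ≠ [] := by
    intro hnil
    have := congrArg List.length hnil
    simp [List.length_drop] at this
    omega
  cases hbd : a.drop p with
  | nil => exact absurd hbd hb
  | cons e b' =>
    cases k with
    | nil => exact absurd rfl hk
    | cons f k' =>
      have hea : e ∈ a := by
        have hmem : e ∈ a.drop p := by rw [hbd]; exact List.mem_cons_self
        exact List.mem_of_mem_drop hmem
      constructor
      · intro hpre
        have : e = f := (List.cons_prefix_cons.mp hpre).1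
        exact hd f List.mem_cons_self (this ▸ hea)
      · intro hpre
        have : f = e := (List.cons_prefix_cons.mp hpre).1
        exact hd f List.mem_cons_self (this ▸ hea)

-- sequential passes commute with a head char none of the keys matches at
theorem pvSeq_cons_comm :
    ∀ (ps : List (List Char × List Char)) (c : Char) (u : List Char),
      (∀ kl ∈ ps, kl.1 ≠ [] ∧ kl.2 ≠ []) →
      (∀ kl ∈ ps, ∀ kl' ∈ ps, ∀ d ∈ kl.1, d ∉ kl'.2) →
      (∀ kl ∈ ps, ¬ kl.1 <+: (c :: u)) →
      pvSeq ps (c :: u) = c :: pvSeq ps u := by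
  intro ps
  induction ps with
  | nil => intro c u _ _ _; rfl
  | cons hd tl ih =>
    intro c u hne hdisj hnp
    have hh : ¬ hd.1 <+: (c :: u) := hnp hd List.mem_cons_self
    rw [pvSeq_cons, pvRep_cons_neg hd.2 hh, pvSeq_cons]
    refine ih c (pvRep hd.1 hd.2 u)
      (fun kl hm => hne kl (List.mem_cons_of_mem _ hm))
      (fun kl hm kl' hm' => hdisj kl (List.mem_cons_of_mem _ hm) kl' (List.mem_cons_of_mem _ hm'))
      ?_
    intro kl hm hpre
    cases hkl : kl.1 with
    | nil =>
      exact hnp kl (List.mem_cons_of_mem _ hm) (hkl ▸ List.nil_prefix)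
    | cons d k'' =>
      rw [hkl] at hpre
      rcases List.cons_prefix_cons.mp hpre with ⟨hdc, htl⟩
      have hk1 : hd.1 ≠ [] := (hne hd List.mem_cons_self).1
      have hl1 : hd.2 ≠ [] := (hne hd List.mem_cons_self).2
      have hdk : ∀ x ∈ k'', x ∉ hd.2 := by
        intro x hx
        exact hdisj kl (List.mem_cons_of_mem _ hm) hd List.mem_cons_self x
          (hkl ▸ List.mem_cons_of_mem _ hx)
      have : k'' <+: u := pvRep_no_new_prefix hk1 hl1 u k'' hdk htl
      exact hnp kl (List.mem_cons_of_mem _ hm) (hkl ▸ List.cons_prefix_cons.mpr ⟨hdc, this⟩)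

-- sequential passes commute past an already-substituted label block
theorem pvSeq_label_comm :
    ∀ (ps : List (List Char × List Char)) (a : List Char),
      (∀ kl ∈ ps, kl.1 ≠ []) →
      (∀ kl ∈ ps, ∀ d ∈ kl.1, d ∉ a) →
      ∀ x, pvSeq ps (a ++ x) = a ++ pvSeq ps x := by
  intro ps
  induction ps with
  | nil => intro a _ _ x; rfl
  | cons hd tl ih =>
    intro a hne hdisj x
    rw [pvSeq_cons,
      pvRep_append_of_noOv hd.2
        (pvNoOvP_of_disjoint (hne hd List.mem_cons_self) (hdisj hd List.mem_cons_self)) x,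
      pvSeq_cons]
    exact ih a (fun kl hm => hne kl (List.mem_cons_of_mem _ hm))
      (fun kl hm => hdisj kl (List.mem_cons_of_mem _ hm)) _

theorem pvFindKey_none {m : List (List Char × List Char)} {s : List Char}
    (h : pvFindKey m s = none) : ∀ kl ∈ m, ¬ kl.1 <+: s := by
  induction m with
  | nil => intro kl hm; simp at hm
  | cons hd tl ih =>
    by_cases hp : hd.1.isPrefixOf s
    · simp [pvFindKey, hp] at h
    · simp only [pvFindKey, hp, Bool.false_eq_true, if_false] at h
      intro kl hm
      rcases List.mem_cons.mp hm with h1 | h1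
      · subst h1; exact fun hc => hp (List.isPrefixOf_iff_prefix.mpr hc)
      · exact ih h kl h1

-- the found key at the front does not depend on what follows it
theorem pvFindKey_stable :
    ∀ (ps : List (List Char × List Char)) (k l r x : List Char), k ≠ [] →
      ps.Pairwise (fun p q => pvNoOvP q.1 p.1) →
      pvFindKey ps (k ++ r) = some (k, l) → pvFindKey ps (k ++ x) = some (k, l) := by
  intro ps
  induction ps with
  | nil => intro k l r x _ _ h; simp [pvFindKey] at h
  | cons hd tl ih =>
    intro k l r x hk hpw h
    by_cases hp : hd.1.isPrefixOf (k ++ r)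
    · simp only [pvFindKey, hp, if_true, Option.some.injEq] at h
      subst h
      simp [pvFindKey, List.isPrefixOf_iff_prefix.mpr (List.prefix_append k x)]
    · simp only [pvFindKey, hp, Bool.false_eq_true, if_false] at h
      have hmem : (k, l) ∈ tl := (pvFindKey_some h).1
      have hno : pvNoOvP k hd.1 := ((List.pairwise_cons.mp hpw).1 (k, l) hmem)
      have hnp : ¬ hd.1 <+: k ++ x := pvNoOvP_not_prefix hno hk
      have hbp : ¬ hd.1.isPrefixOf (k ++ x) = true :=
        fun hb => hnp (List.isPrefixOf_iff_prefix.mp hb)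
      simp only [pvFindKey, hbp, Bool.false_eq_true, if_false]
      exact ih k l r x hk (List.pairwise_cons.mp hpw).2 h

-- a matched key at the front: the sequential passes produce the label and proceed on the rest
theorem pvSeq_split :
    ∀ (ps : List (List Char × List Char)) (k l r : List Char),
      (∀ kl ∈ ps, kl.1 ≠ [] ∧ kl.2 ≠ []) →
      (∀ kl ∈ ps, ∀ kl' ∈ ps, ∀ d ∈ kl.1, d ∉ kl'.2) →
      ps.Pairwise (fun p q => pvNoOvP q.1 p.1) →
      pvFindKey ps (k ++ r) = some (k, l) →
      pvSeq ps (k ++ r) = l ++ pvSeq ps r := by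
  intro ps
  induction ps with
  | nil => intro k l r _ _ _ h; simp [pvFindKey] at h
  | cons hd tl ih =>
    intro k l r hne hdisj hpw h
    have hk : k ≠ [] := by
      have := (pvFindKey_some h).1
      exact (hne (k, l) this).1
    by_cases hp : hd.1.isPrefixOf (k ++ r)
    · simp only [pvFindKey, hp, if_true, Option.some.injEq] at h
      subst h
      have hstep : pvRep k l (k ++ r) = l ++ pvRep k l r := by
        cases k with
        | nil => exact absurd rfl hk
        | cons c k' =>
          rw [List.cons_append,
            pvRep_cons_pos l (by rw [← List.cons_append]; exact List.prefix_append _ r) hk]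
          rw [← List.cons_append, List.drop_left]
      rw [pvSeq_cons, hstep,
        pvSeq_label_comm tl l
          (fun kl hm => (hne kl (List.mem_cons_of_mem _ hm)).1)
          (fun kl hm d hdm =>
            hdisj kl (List.mem_cons_of_mem _ hm) (k, l) List.mem_cons_self d hdm)
          (pvRep k l r),
        pvSeq_cons]
    · simp only [pvFindKey, hp, Bool.false_eq_true, if_false] at h
      have hmem : (k, l) ∈ tl := (pvFindKey_some h).1
      have hno : pvNoOvP k hd.1 := ((List.pairwise_cons.mp hpw).1 (k, l) hmem)
      have hpass : pvRep hd.1 hd.2 (k ++ r) = k ++ pvRep hd.1 hd.2 r :=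
        pvRep_append_of_noOv hd.2 hno r
      have hfind : pvFindKey tl (k ++ pvRep hd.1 hd.2 r) = some (k, l) :=
        pvFindKey_stable tl k l r _ hk (List.pairwise_cons.mp hpw).2 h
      rw [pvSeq_cons, hpass,
        ih k l (pvRep hd.1 hd.2 r)
          (fun kl hm => hne kl (List.mem_cons_of_mem _ hm))
          (fun kl hm kl' hm' =>
            hdisj kl (List.mem_cons_of_mem _ hm) kl' (List.mem_cons_of_mem _ hm'))
          (List.pairwise_cons.mp hpw).2 hfind,
        pvSeq_cons]

-- the concrete facts about the ten (key, label) pairs the lemmas need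
set_option maxRecDepth 4000 in
theorem pvFact_ne : ∀ kl ∈ pvMapping, kl.1 ≠ [] ∧ kl.2 ≠ [] := by decide

theorem pvFact_disjB : pvMapping.all
    (fun kl => pvMapping.all (fun kl' => kl.1.all (fun d => !(kl'.2.contains d)))) = true := by
  decide

theorem pvFact_disj : ∀ kl ∈ pvMapping, ∀ kl' ∈ pvMapping, ∀ d ∈ kl.1, d ∉ kl'.2 := by
  have hb := pvFact_disjB
  simp only [List.all_eq_true, Bool.not_eq_true', List.contains_eq_mem,
    decide_eq_false_iff_not] at hb
  exact hb

def pvNoOvB (a k : List Char) : Bool :=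
  (List.range a.length).all (fun p => !((a.drop p).isPrefixOf k) && !(k.isPrefixOf (a.drop p)))

theorem pvNoOvB_spec {a k : List Char} (h : pvNoOvB a k = true) : pvNoOvP a k := by
  intro p hp
  have := (List.all_eq_true.mp h) p (List.mem_range.mpr hp)
  rcases Bool.and_eq_true_iff.mp this with ⟨h1, h2⟩
  exact ⟨fun hc => by simp [List.isPrefixOf_iff_prefix.mpr hc] at h1,
         fun hc => by simp [List.isPrefixOf_iff_prefix.mpr hc] at h2⟩

def pvOrdB : List (List Char × List Char) → Bool
  | [] => true
  | kl :: ps => ps.all (fun kl' => pvNoOvB kl'.1 kl.1) && pvOrdB ps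

theorem pvOrdB_pairwise : ∀ ps, pvOrdB ps = true →
    ps.Pairwise (fun p q => pvNoOvP q.1 p.1) := by
  intro ps
  induction ps with
  | nil => intro _; exact List.Pairwise.nil
  | cons hd tl ih =>
    intro h
    rcases Bool.and_eq_true_iff.mp h with ⟨h1, h2⟩
    exact List.pairwise_cons.mpr
      ⟨fun q hq => pvNoOvB_spec ((List.all_eq_true.mp h1) q hq), ih h2⟩

set_option maxRecDepth 4000 in
theorem pvFact_ordB : pvOrdB pvMapping = true := by decide

theorem pvFact_ord : pvMapping.Pairwise (fun p q => pvNoOvP q.1 p.1) :=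
  pvOrdB_pairwise _ pvFact_ordB

theorem pvSub_cons_some {c : Char} {t : List Char} {kl : List Char × List Char}
    (h : pvFindKey pvMapping (c :: t) = some kl) :
    pvSub (c :: t) = kl.2 ++ pvSub ((c :: t).drop kl.1.length) := by
  rw [pvSub]
  split
  · rename_i kl' heq
    rw [h] at heq
    cases heq
    rfl
  · rename_i heq
    rw [h] at heq
    cases heq

theorem pvSub_cons_none {c : Char} {t : List Char}
    (h : pvFindKey pvMapping (c :: t) = none) :
    pvSub (c :: t) = c :: pvSub t := by
  rw [pvSub]
  split
  · rename_i kl' heq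
    rw [h] at heq
    cases heq
  · rfl

-- MAIN: the ten sequential passes of A equal the single scan of B
theorem pvSeq_eq_pvSub : ∀ s, pvSeq pvMapping s = pvSub s := by
  intro s
  induction s using pvSub.induct with
  | case1 => rw [pvSub, pvSeq_nil_str]
  | case2 c t kl h ih =>
    rcases pvFindKey_some h with ⟨hm, hpre⟩
    rcases hpre with ⟨r, hr⟩
    have hdrop : (c :: t).drop kl.1.length = r := by
      rw [← hr, List.drop_left]
    rw [hdrop] at ih
    have hf : pvFindKey pvMapping (kl.1 ++ r) = some (kl.1, kl.2) := by
      rw [hr]; simpa using h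
    rw [pvSub_cons_some h, hdrop, ← hr,
      pvSeq_split pvMapping kl.1 kl.2 r pvFact_ne pvFact_disj pvFact_ord hf, ih]
  | case3 c t h ih =>
    rw [pvSub_cons_none h,
      pvSeq_cons_comm pvMapping c t pvFact_ne pvFact_disj (pvFindKey_none h), ih]

-- bridge: port A's string-level computation is exactly pvSeq over pvMapping
set_option maxRecDepth 20000 in
theorem portA_eq (t : String) (h : ¬ t = "") :
    humanize_tip_text_py (some t) = String.ofList (pvSeq pvMapping t.toList) := by
  simp only [humanize_tip_text_py, if_neg h, pvMetricLabels, List.foldl_cons, List.foldl_nil,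
    pvSeq, pvMapping, PySem.Str.replace, String.toList_ofList]
  rw [pvReplace_eq_pvRep _ _ _ (by decide), pvReplace_eq_pvRep _ _ _ (by decide),
    pvReplace_eq_pvRep _ _ _ (by decide), pvReplace_eq_pvRep _ _ _ (by decide),
    pvReplace_eq_pvRep _ _ _ (by decide), pvReplace_eq_pvRep _ _ _ (by decide),
    pvReplace_eq_pvRep _ _ _ (by decide), pvReplace_eq_pvRep _ _ _ (by decide),
    pvReplace_eq_pvRep _ _ _ (by decide), pvReplace_eq_pvRep _ _ _ (by decide)]

-- ===== VERDICT (by name: the statement is the Claim_ definition above) =====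
theorem humanize_tip_text_py_spec : Claim_equal_humanize_tip_text_py := by
  intro text _
  unfold Spec_humanize_tip_text_py
  cases text with
  | none => rfl
  | some t =>
    by_cases h : t = ""
    · subst h
      simp [humanize_tip_text_py, humanize_tip_text_py_alt]
    · rw [portA_eq t h]
      simp only [humanize_tip_text_py_alt, if_neg h]
      rw [pvSeq_eq_pvSub]
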